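-- pv_equiv track=rewrite | github.com/ChristopherChilders/game-of-thrones-python | game-of-thrones/game-of-thrones.py | make_house_historgram
-- ===== SOURCE A (Python) =====
-- def make_house_historgram(character_list):
--         histogram = {}
--         # 2. do the thing!
--         #loop through all the characters
--         for person in character_list:
--                 allegiances = person['allegiances']
--                 #allegiances is a list of URLs
--                 for house in allegiances:
--                         #do something with that house
--                         if house in histogram:
--                                 histogram[house] = histogram[house] + 1
--                         else:
--                                 histogram[house] = 1
--         return histogram
-- ===== SOURCE B (Python) =====
-- def make_house_historgram(character_list):
--         # Stage 1: flatten every person's allegiances into one list.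
--         flat = []
--         for person in character_list:
--                 flat.extend(person['allegiances'])
--         # Stage 2: repeatedly take the first remaining house, record its total
--         # count, and strip all its occurrences; first-occurrence order is kept.
--         pairs = []
--         rem = flat
--         while rem:
--                 house = rem[0]
--                 pairs.append((house, rem.count(house)))
--                 rem = [x for x in rem[1:] if x != house]
--         return dict(pairs)
-- ===== Notes on version B (the rewrite author's own statement) =====
-- stated objective: alternative
-- what changed: Replaces the incremental hash-accumulation (membership test + increment per element) with a two-stage flatten-then-partition algorithm: a worklist loop that peels off the first remaining house, counts all its occurrences at once, filters them out, and finally builds the dict from the collected (house, count) pairs.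
import Mathlib
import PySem

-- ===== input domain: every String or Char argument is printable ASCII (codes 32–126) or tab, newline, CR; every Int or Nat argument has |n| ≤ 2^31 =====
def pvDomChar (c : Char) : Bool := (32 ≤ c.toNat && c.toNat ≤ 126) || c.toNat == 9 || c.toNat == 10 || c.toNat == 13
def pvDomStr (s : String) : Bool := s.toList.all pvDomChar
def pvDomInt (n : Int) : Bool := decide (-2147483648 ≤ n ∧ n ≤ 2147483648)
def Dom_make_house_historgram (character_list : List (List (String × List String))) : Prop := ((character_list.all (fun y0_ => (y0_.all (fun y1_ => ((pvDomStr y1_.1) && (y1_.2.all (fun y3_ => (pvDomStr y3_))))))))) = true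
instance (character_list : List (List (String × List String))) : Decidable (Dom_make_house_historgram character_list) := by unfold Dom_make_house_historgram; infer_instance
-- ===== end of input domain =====

-- B replaces A's incremental hash accumulation by a two-stage flatten-then-partition worklist (alternative algorithm, same result).


-- ===== PORT A =====
-- literal port: outer loop over persons, inner loop over allegiances, membership test then increment or initialise
def make_house_historgram (character_list : List (List (String × List String))) : List (String × Int) :=
  (character_list.foldl (fun histogram person =>
      let allegiances := (PySem.Dict.mk person).getD "allegiances" []
      allegiances.foldl (fun histogram house =>
        if histogram.contains house then histogram.insert house (histogram.getD house 0 + 1)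
        else histogram.insert house 1) histogram)
    PySem.Dict.empty).items

-- ===== PORT B =====
-- literal port of Source B's while loop: peel off the first remaining house, record (house, rem.count(house)), filter it out
def pvRuns (rem : List String) : List (String × Int) :=
  match rem with
  | [] => []
  | house :: rest =>
      (house, ((house :: rest).count house : Int))
        :: pvRuns (rest.filter (fun x => x ≠ house))
termination_by rem.length
decreasing_by
  simp only [List.length_unattach, List.length_cons, Nat.lt_succ_iff]
  exact le_trans (List.length_filter_le _ _) (by simp)

def make_house_historgram_alt (character_list : List (List (String × List String))) : List (String × Int) :=
  let flat := character_list.foldl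
    (fun flat person => flat ++ (PySem.Dict.mk person).getD "allegiances" []) []
  (PySem.Dict.ofList (pvRuns flat)).items

-- ===== PRECONDITION & SPEC =====
-- Pre_ excludes persons without an 'allegiances' key, on which the Python A raises KeyError.
def Pre_make_house_historgram (character_list : List (List (String × List String))) : Prop :=
  ∀ person ∈ character_list, (PySem.Dict.mk person).contains "allegiances" = true
instance (character_list : List (List (String × List String))) : Decidable (Pre_make_house_historgram character_list) := by unfold Pre_make_house_historgram; infer_instance
def pvWitness_make_house_historgram : (List (List (String × List String))) :=
  [[("allegiances", ["stark", "tully"])], [("allegiances", ["stark"])]]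

def Spec_make_house_historgram (character_list : List (List (String × List String))) (out : List (String × Int)) : Prop := out = make_house_historgram_alt character_list
instance (character_list : List (List (String × List String))) (out : List (String × Int)) : Decidable (Spec_make_house_historgram character_list out) := by unfold Spec_make_house_historgram; infer_instance

-- ===== CLAIM (what is proved, stated in full; the proofs are below) =====
def Claim_equal_make_house_historgram : Prop := ∀ (character_list : List (List (String × List String))), Dom_make_house_historgram character_list → Pre_make_house_historgram character_list → Spec_make_house_historgram character_list (make_house_historgram character_list)

-- ===== LEMMAS AND PROOFS =====

-- A's loop body is insert-with-getD+1 regardless of the branch taken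
theorem stepA_eq (h : PySem.Dict String Int) (x : String) :
    (if h.contains x then h.insert x (h.getD x 0 + 1) else h.insert x 1)
      = h.insert x (h.getD x 0 + 1) := by
  by_cases hc : h.contains x = true
  · simp [hc]
  · have hcf : h.contains x = false := by simpa using hc
    simp [hcf, PySem.Dict.getD_of_not_contains _ _ hcf]

-- A's whole accumulation is Counter(flat) of the flattened allegiances
theorem portA_eq_counter_items (cl : List (List (String × List String))) :
    make_house_historgram cl
      = (PySem.Set.ofList (cl.flatMap (fun person => (PySem.Dict.mk person).getD "allegiances" []))).map
          (fun k => (k, ((cl.flatMap (fun person => (PySem.Dict.mk person).getD "allegiances" [])).count k : Int))) := by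
  unfold make_house_historgram
  rw [← List.foldl_flatMap]
  have hstep : (fun (histogram : PySem.Dict String Int) (house : String) =>
        if histogram.contains house then histogram.insert house (histogram.getD house 0 + 1)
        else histogram.insert house 1)
      = (fun histogram house => histogram.insert house (histogram.getD house 0 + 1)) := by
    funext d x; exact stepA_eq d x
  rw [hstep, PySem.Dict.foldl_insert_getD_add_one_eq_counter, PySem.Dict.items_counter]

-- set(xs) commutes with filter
theorem ofList_filter (p : String → Bool) (t : List String) :
    (PySem.Set.ofList t).filter p = PySem.Set.ofList (t.filter p) := by
  induction t using List.reverseRecOn with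
  | nil => rfl
  | append_singleton t x ih =>
    have hadd : ∀ (l : List String), PySem.Set.ofList (l ++ [x]) = PySem.Set.add (PySem.Set.ofList l) x := by
      intro l; rw [PySem.Set.ofList_append]; rfl
    rw [hadd, List.filter_append]
    by_cases hp : p x = true
    · simp only [List.filter_cons, hp, if_pos, List.filter_nil, hadd]
      by_cases hmem : x ∈ t
      · simp [PySem.Set.add, hmem, hp, ih]
      · simp [PySem.Set.add, hmem, hp, ih, List.filter_append]
    · have hp' : p x = false := by simpa using hp
      by_cases hmem : x ∈ t
      · simp [PySem.Set.add, hmem, hp', ih]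
      · simp [PySem.Set.add, hmem, hp', ih, List.filter_append]

-- set(h :: t) is h followed by set(t with h removed)
theorem ofList_cons_filter (h : String) (t : List String) :
    PySem.Set.ofList (h :: t) = h :: PySem.Set.ofList (t.filter (fun x => x ≠ h)) := by
  have h1 : PySem.Set.ofList (h :: t) = PySem.Set.update [h] t := rfl
  rw [h1, PySem.Set.update_eq_append_filter, ofList_filter]
  have hpred : t.filter (fun y => !PySem.Set.contains [h] y) = t.filter (fun x => x ≠ h) :=
    List.filter_congr (fun y _ => by simp [PySem.Set.contains])
  rw [hpred]
  rfl

-- the worklist loop produces exactly (first occurrences, total counts)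
theorem pvRuns_eq_of_le (n : Nat) : ∀ (xs : List String), xs.length ≤ n →
    pvRuns xs = (PySem.Set.ofList xs).map (fun k => (k, (xs.count k : Int))) := by
  induction n with
  | zero =>
    intro xs hlen
    have : xs = [] := List.eq_nil_of_length_eq_zero (Nat.le_zero.mp hlen)
    subst this
    rw [pvRuns.eq_def]
    rfl
  | succ n ih =>
    intro xs hlen
    match xs with
    | [] =>
      rw [pvRuns.eq_def]
      rfl
    | house :: rest =>
      have hflen : (rest.filter (fun x => x ≠ house)).length ≤ n := by
        have h1 : (rest.filter (fun x => x ≠ house)).length ≤ rest.length :=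
          List.length_filter_le _ _
        have h2 : rest.length ≤ n := by simpa using Nat.le_of_succ_le_succ hlen
        omega
      rw [pvRuns.eq_def]
      simp only []
      rw [ih _ hflen, ofList_cons_filter]
      simp only [List.map_cons, List.count_cons_self]
      congr 1
      apply List.map_congr_left
      intro k hk
      have hkmem : k ∈ rest.filter (fun x => x ≠ house) :=
        (PySem.Set.mem_ofList _ k).mp hk
      have hkne : k ≠ house := by
        have := (List.mem_filter.mp hkmem).2
        simpa using this
      have hcnt : (rest.filter (fun x => x ≠ house)).count k = rest.count k :=
        List.count_filter (by simpa using hkne)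
      rw [hcnt]
      simp [List.count_cons]
      exact fun h => hkne h.symm

theorem pvRuns_eq (xs : List String) :
    pvRuns xs = (PySem.Set.ofList xs).map (fun k => (k, (xs.count k : Int))) :=
  pvRuns_eq_of_le xs.length xs le_rfl

-- dict(pairs) over nodup keys returns the pairs unchanged
theorem items_ofList_nodup (pairs : List (String × Int))
    (hnd : (pairs.map Prod.fst).Nodup) :
    (PySem.Dict.ofList pairs).items = pairs := by
  have h1 : PySem.Dict.ofList pairs
      = pairs.foldl (fun d p => d.insert p.1 p.2) PySem.Dict.empty := rfl
  have hempty : (PySem.Dict.empty : PySem.Dict String Int).items = [] := rfl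
  rw [h1, PySem.Dict.items_foldl_insert_fresh pairs Prod.fst Prod.snd PySem.Dict.empty
      (fun a _ => by simp) hnd, hempty]
  simp

-- ===== VERDICT (by name: the statement is the Claim_ definition above) =====
theorem make_house_historgram_spec : Claim_equal_make_house_historgram := by
  intro cl _ _
  show make_house_historgram cl = make_house_historgram_alt cl
  simp only [make_house_historgram_alt]
  rw [PySem.List.foldl_append_eq_flatMap, List.nil_append, pvRuns_eq]
  have hnd : (((PySem.Set.ofList (cl.flatMap (fun person => (PySem.Dict.mk person).getD "allegiances" []))).map
      (fun k => (k, ((cl.flatMap (fun person => (PySem.Dict.mk person).getD "allegiances" [])).count k : Int)))).map Prod.fst).Nodup := by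
    simp only [List.map_map, Function.comp_def]
    simp
  rw [items_ofList_nodup _ hnd]
  exact portA_eq_counter_items cl
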